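-- pv_equiv track=rewrite | github.com/anpoli99/NyuProgTeamMeetings2022-23 | Week 5/solutions/F/F_downtime.py | downtime
-- ===== SOURCE A (Python) =====
-- import bisect
--
-- INF = 10 ** 9 + 5
--
-- def downtime(n, k, a):
--     # There's other solutions to this problem, such as using a two-pointer approach.
--     # If you implement it fast enough, we could just have an array that has the count of
--     # requests at each time, and then iterate over every subarray of size 1000.
--     # I think it's worth noting that the bisect approach requires almost no code compared to
--     # these alternatives and is still pretty fast.
--     s = []
--     for i in range(n):
--         # A useful trick; we can find the index of a lower bound in a set in O(log n) time
--         # by storing it as a pair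
--         s.append((a[i], i))
--     s.sort()
--     ans = 0
--     for i in range(n):
--         # bisect.bisect_left returns the index of the first element that is greater than or equal to x
--         # bisect.bisect_right returns the index of the first element that is greater than x
--         it = bisect.bisect_left(s, (a[i] - 1000, INF))
--         ans = max(ans, i - s[it][1] + 1)
--     ans = (ans + k - 1) // k
--     return ans
-- ===== SOURCE B (Python) =====
-- def downtime(n, k, a):
--     # Offline two-pointer: sort the (time, index) pairs once; since the queries
--     # (one per pair, in sorted order) have nondecreasing thresholds, a single
--     # pointer sweeps the sorted list instead of a binary search per query.
--     pairs = sorted(zip(a[:n], range(n)))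
--     ans = 0
--     p = 0
--     for v, i in pairs:
--         t = v - 1000
--         while pairs[p][0] <= t:
--             p += 1
--         ans = max(ans, i - pairs[p][1] + 1)
--     return (ans + k - 1) // k
-- ===== Notes on version B (the rewrite author's own statement) =====
-- stated objective: faster
-- what changed: B replaces A's per-element bisect_left binary search over the sorted (time, index) pairs with a single monotone two-pointer sweep: the queries are processed in sorted order, so one pointer advances over the sorted list exactly once instead of n binary searches with tuple comparisons; Pre_ excludes n > len(a) (IndexError), k = 0 (ZeroDivisionError), and n > 10^9+5 (A's INF index sentinel is only a valid bound when every index is below it; such an input needs a list of over 10^9 elements).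
import Mathlib
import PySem

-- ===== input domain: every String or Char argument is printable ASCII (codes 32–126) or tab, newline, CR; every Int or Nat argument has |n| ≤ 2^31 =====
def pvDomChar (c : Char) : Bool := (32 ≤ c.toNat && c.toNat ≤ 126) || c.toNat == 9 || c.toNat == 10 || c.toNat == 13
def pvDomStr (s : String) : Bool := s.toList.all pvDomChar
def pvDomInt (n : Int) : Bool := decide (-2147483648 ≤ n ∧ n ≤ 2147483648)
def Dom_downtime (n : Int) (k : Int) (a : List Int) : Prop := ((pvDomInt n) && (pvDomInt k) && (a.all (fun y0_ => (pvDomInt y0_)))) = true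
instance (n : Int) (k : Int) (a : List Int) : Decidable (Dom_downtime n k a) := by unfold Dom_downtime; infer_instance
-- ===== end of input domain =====

-- B replaces A's per-element bisect with a single two-pointer sweep of the sorted pairs (alternative algorithm; measured constant-factor speedup).
-- ===== PORT A =====

-- Python compares tuples lexicographically; Mathlib's `<` on Int × Int is the pointwise
-- order, so the tuple comparison is ported by hand (exact: strict lexicographic order,
-- the comparison `sorted2`/list.sort and bisect use).
def pvLexLt (p q : Int × Int) : Bool :=
  decide (p.1 < q.1) || (!decide (q.1 < p.1) && decide (p.2 < q.2))

-- hand port of bisect.bisect_left's loop on a list of int pairs (exact: same lo/hi/mid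
-- arithmetic; mid < hi ≤ len(s), so s[mid] is in range and getD never takes its default)
def pvBisect (s : List (Int × Int)) (x : Int × Int) (lo hi : Nat) : Nat :=
  if _h : lo < hi then
    let mid := (lo + hi) / 2
    if pvLexLt (s.getD mid (0, 0)) x then pvBisect s x (mid + 1) hi
    else pvBisect s x lo mid
  else lo
termination_by hi - lo
decreasing_by all_goals omega

def downtime (n : Int) (k : Int) (a : List Int) : Int :=
  let s := (PySem.List.pyRange 0 n 1).foldl
    (fun acc i => acc ++ [(PySem.List.pyGetD a i 0, i)]) ([] : List (Int × Int))
  let s2 := PySem.List.sorted2 s (fun p => p.1) (fun p => p.2)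
  let ans := (PySem.List.pyRange 0 n 1).foldl
    (fun ans i =>
      let it := pvBisect s2 (PySem.List.pyGetD a i 0 - 1000, 1000000005) 0 s2.length
      max ans (i - (PySem.List.pyGetD s2 (it : Int) (0, 0)).2 + 1)) 0
  PySem.Int.floordiv (ans + k - 1) k

-- ===== PORT B =====

-- hand port of B's `while pairs[p][0] <= t: p += 1` (exact: the `p < len` guard only
-- makes the recursion total; under Pre_ the sweep provably stops before the end)
def pvAdvance (pairs : List (Int × Int)) (t : Int) (p : Nat) : Nat :=
  if _h : p < pairs.length then
    if (pairs.getD p (0, 0)).1 ≤ t then pvAdvance pairs t (p + 1) else p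
  else p
termination_by pairs.length - p
decreasing_by omega

def downtime_alt (n : Int) (k : Int) (a : List Int) : Int :=
  let pairs := PySem.List.sorted2
    ((PySem.List.slice a none (some n)).zip (PySem.List.pyRange 0 n 1))
    (fun p => p.1) (fun p => p.2)
  let st := pairs.foldl
    (fun (st : Int × Nat) vi =>
      let t := vi.1 - 1000
      let p := pvAdvance pairs t st.2
      (max st.1 (vi.2 - (PySem.List.pyGetD pairs (p : Int) (0, 0)).2 + 1), p))
    ((0 : Int), (0 : Nat))
  PySem.Int.floordiv (st.1 + k - 1) k

-- ===== PRECONDITION & SPEC =====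
-- Pre_ excludes exactly: n > len(a) (A raises IndexError), k = 0 (A raises
-- ZeroDivisionError), and n > 10^9+5 (A's bisect key uses the sentinel INF = 10^9+5,
-- which is a correct upper bound for an index only when every index is below it; a
-- list long enough to violate this has over 10^9 elements and cannot be materialised).
def Pre_downtime (n : Int) (k : Int) (a : List Int) : Prop :=
  n ≤ (a.length : Int) ∧ k ≠ 0 ∧ n ≤ 1000000005
instance (n : Int) (k : Int) (a : List Int) : Decidable (Pre_downtime n k a) := by
  unfold Pre_downtime; infer_instance

def pvWitness_downtime : Int × Int × List Int := (3, 2, [5, 900, 1400])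

def Spec_downtime (n : Int) (k : Int) (a : List Int) (out : Int) : Prop := out = downtime_alt n k a
instance (n : Int) (k : Int) (a : List Int) (out : Int) : Decidable (Spec_downtime n k a out) := by unfold Spec_downtime; infer_instance

-- ===== CLAIM (what is proved, stated in full; the proofs are below) =====
def Claim_equal_downtime : Prop := ∀ (n : Int) (k : Int) (a : List Int), Dom_downtime n k a → Pre_downtime n k a → Spec_downtime n k a (downtime n k a)

-- ===== LEMMAS AND PROOFS =====

-- the strict lexicographic order, unfolded
theorem pvLexLt_iff (p q : Int × Int) :
    pvLexLt p q = true ↔ (p.1 < q.1 ∨ (p.1 = q.1 ∧ p.2 < q.2)) := by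
  simp [pvLexLt]; omega

-- comparison against the sentinel (10^9+5, "INF"): for a pair whose index is below the
-- sentinel, `pair < (t, INF)` is exactly `value ≤ t`
theorem pvLexLt_inf {x : Int × Int} (t : Int) (hx : x.2 < 1000000005) :
    (pvLexLt x (t, 1000000005) = true) ↔ x.1 ≤ t := by
  rw [pvLexLt_iff]; simp; omega

theorem pvLexLt_false_iff (p q : Int × Int) :
    pvLexLt p q = false ↔ (q.1 < p.1 ∨ (p.1 = q.1 ∧ q.2 ≤ p.2)) := by
  simp [pvLexLt]; omega

-- insertion sort with a comparison whose negation is transitive yields a list pairwise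
-- ordered by that negation
theorem pairwise_insertBy {α : Type} (before : α → α → Bool)
    (htr : ∀ a b c : α, before b a = false → before c b = false → before c a = false)
    (hasym : ∀ a b : α, before a b = true → before b a = false)
    (x : α) (ys : List α) (hys : ys.Pairwise (fun a b => before b a = false)) :
    (PySem.List.insertBy before x ys).Pairwise (fun a b => before b a = false) := by
  induction ys with
  | nil => simp [PySem.List.insertBy]
  | cons y ys ih =>
    rw [List.pairwise_cons] at hys
    by_cases h : before x y = true
    · rw [PySem.List.insertBy, if_pos h]
      refine List.pairwise_cons.2 ⟨?_, List.pairwise_cons.2 ⟨hys.1, hys.2⟩⟩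
      intro z hz
      rcases List.mem_cons.1 hz with rfl | hz
      · exact hasym _ _ h
      · exact htr _ _ _ (hasym _ _ h) (hys.1 z hz)
    · rw [PySem.List.insertBy, if_neg h]
      refine List.pairwise_cons.2 ⟨?_, ih hys.2⟩
      intro z hz
      rcases (PySem.List.mem_insertBy before x z ys).1 hz with rfl | hz
      · exact Bool.eq_false_iff.2 h
      · exact hys.1 z hz

theorem pairwise_foldl_insertBy {α : Type} (before : α → α → Bool)
    (htr : ∀ a b c : α, before b a = false → before c b = false → before c a = false)
    (hasym : ∀ a b : α, before a b = true → before b a = false)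
    (xs acc : List α) (hacc : acc.Pairwise (fun a b => before b a = false)) :
    (xs.foldl (fun acc x => PySem.List.insertBy before x acc) acc).Pairwise
      (fun a b => before b a = false) := by
  induction xs generalizing acc with
  | nil => exact hacc
  | cons x xs ih => exact ih _ (pairwise_insertBy before htr hasym x acc hacc)

theorem pvLexLt_trans_neg (a b c : Int × Int)
    (h1 : pvLexLt b a = false) (h2 : pvLexLt c b = false) : pvLexLt c a = false := by
  simp [pvLexLt] at *; omega

theorem pvLexLt_asym (a b : Int × Int) (h : pvLexLt a b = true) : pvLexLt b a = false := by
  simp [pvLexLt] at *; omega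

-- Python's sort of int pairs: the result is pairwise non-decreasing lexicographically
theorem sorted2_pairs_pairwise (L : List (Int × Int)) :
    (PySem.List.sorted2 L (fun p => p.1) (fun p => p.2)).Pairwise
      (fun a b => pvLexLt b a = false) := by
  exact pairwise_foldl_insertBy pvLexLt pvLexLt_trans_neg pvLexLt_asym L [] (by simp)

-- first components of a lexicographically sorted list are monotone
theorem sorted_fst_mono {S : List (Int × Int)}
    (hS : S.Pairwise (fun a b => pvLexLt b a = false))
    {i j : Nat} (hi : i < S.length) (hj : j < S.length) (hij : i ≤ j) :
    S[i].1 ≤ S[j].1 := by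
  rcases Nat.lt_or_ge i j with h | h
  · have h2 : pvLexLt S[j] S[i] = false := (List.pairwise_iff_getElem.1 hS) i j hi hj h
    rw [pvLexLt_false_iff] at h2; omega
  · have hij' : i = j := Nat.le_antisymm hij h
    subst hij'; exact le_refl _

-- full characterisation of the hand-ported bisect on a sorted list of pairs whose
-- indices are below the sentinel
theorem pvBisect_spec {S : List (Int × Int)}
    (hS : S.Pairwise (fun a b => pvLexLt b a = false))
    (hmem : ∀ x ∈ S, x.2 < 1000000005) (t : Int) :
    ∀ lo hi, lo ≤ hi → hi ≤ S.length →
      (∀ j (_hj : j < S.length), j < lo → S[j].1 ≤ t) →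
      (∀ j (_hj : j < S.length), hi ≤ j → t < S[j].1) →
      (pvBisect S (t, 1000000005) lo hi ≤ S.length ∧
        (∀ j (_hj : j < S.length), j < pvBisect S (t, 1000000005) lo hi → S[j].1 ≤ t) ∧
        (∀ j (_hj : j < S.length), pvBisect S (t, 1000000005) lo hi ≤ j → t < S[j].1)) := by
  have main : ∀ (fuel lo hi : Nat), hi - lo ≤ fuel → lo ≤ hi → hi ≤ S.length →
      (∀ j (_hj : j < S.length), j < lo → S[j].1 ≤ t) →
      (∀ j (_hj : j < S.length), hi ≤ j → t < S[j].1) →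
      (pvBisect S (t, 1000000005) lo hi ≤ S.length ∧
        (∀ j (_hj : j < S.length), j < pvBisect S (t, 1000000005) lo hi → S[j].1 ≤ t) ∧
        (∀ j (_hj : j < S.length), pvBisect S (t, 1000000005) lo hi ≤ j → t < S[j].1)) := by
    intro fuel
    induction fuel with
    | zero =>
      intro lo hi hf hlh hhi hpre hpost
      have hle : ¬ lo < hi := by omega
      rw [pvBisect, dif_neg hle]
      exact ⟨by omega, fun j hj h => hpre j hj h, fun j hj h => hpost j hj (by omega)⟩
    | succ fuel ih =>
      intro lo hi hf hlh hhi hpre hpost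
      by_cases h : lo < hi
      · rw [pvBisect, dif_pos h]
        dsimp only
        have hmidlt : (lo + hi) / 2 < hi := by omega
        have hmidge : lo ≤ (lo + hi) / 2 := by omega
        have hmidlen : (lo + hi) / 2 < S.length := Nat.lt_of_lt_of_le hmidlt hhi
        rw [List.getD_eq_getElem S (0, 0) hmidlen]
        by_cases hc : pvLexLt S[(lo + hi) / 2] (t, 1000000005) = true
        · rw [if_pos hc]
          have hval : S[(lo + hi) / 2].1 ≤ t :=
            (pvLexLt_inf t (hmem _ (List.getElem_mem hmidlen))).1 hc
          exact ih ((lo + hi) / 2 + 1) hi (by omega) (by omega) hhi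
            (fun j hj hjlt =>
              le_trans (sorted_fst_mono hS hj hmidlen (by omega)) hval)
            hpost
        · rw [if_neg hc]
          have hval : t < S[(lo + hi) / 2].1 := by
            rcases Int.lt_or_le t S[(lo + hi) / 2].1 with h' | h'
            · exact h'
            · exact absurd ((pvLexLt_inf t (hmem _ (List.getElem_mem hmidlen))).2 h') hc
          exact ih lo ((lo + hi) / 2) (by omega) (by omega) (le_of_lt hmidlen) hpre
            (fun j hj hjge =>
              lt_of_lt_of_le hval (sorted_fst_mono hS hmidlen hj hjge))
      · rw [pvBisect, dif_neg h]
        have : lo = hi := by omega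
        exact ⟨by omega, fun j hj hlt => hpre j hj hlt,
          fun j hj hge => hpost j hj (by omega)⟩
  intro lo hi hlh hhi hpre hpost
  exact main (hi - lo) lo hi (le_refl _) hlh hhi hpre hpost

-- full characterisation of the two-pointer advance, given that everything before the
-- entry pointer is already known to be ≤ t
theorem pvAdvance_spec {S : List (Int × Int)}
    (hS : S.Pairwise (fun a b => pvLexLt b a = false)) (t : Int) :
    ∀ p, p ≤ S.length → (∀ j (_hj : j < S.length), j < p → S[j].1 ≤ t) →
      (pvAdvance S t p ≤ S.length ∧
        (∀ j (_hj : j < S.length), j < pvAdvance S t p → S[j].1 ≤ t) ∧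
        (∀ j (_hj : j < S.length), pvAdvance S t p ≤ j → t < S[j].1)) := by
  have main : ∀ (fuel p : Nat), S.length - p ≤ fuel → p ≤ S.length →
      (∀ j (_hj : j < S.length), j < p → S[j].1 ≤ t) →
      (pvAdvance S t p ≤ S.length ∧
        (∀ j (_hj : j < S.length), j < pvAdvance S t p → S[j].1 ≤ t) ∧
        (∀ j (_hj : j < S.length), pvAdvance S t p ≤ j → t < S[j].1)) := by
    intro fuel
    induction fuel with
    | zero =>
      intro p hf hp hpre
      have hple : ¬ p < S.length := by omega
      rw [pvAdvance, dif_neg hple]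
      exact ⟨by omega, fun j hj h => hpre j hj h, fun j hj h => absurd hj (by omega)⟩
    | succ fuel ih =>
      intro p hf hp hpre
      by_cases h : p < S.length
      · rw [pvAdvance, dif_pos h]
        rw [List.getD_eq_getElem S (0, 0) h]
        by_cases hc : S[p].1 ≤ t
        · rw [if_pos hc]
          exact ih (p + 1) (by omega) (by omega)
            (fun j hj hjlt => by
              rcases Nat.lt_or_ge j p with h' | h'
              · exact hpre j hj h'
              · have : j = p := by omega
                subst this; exact hc)
        · rw [if_neg hc]
          exact ⟨le_of_lt h, fun j hj hjlt => hpre j hj hjlt,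
            fun j hj hjge =>
              lt_of_lt_of_le (by omega) (sorted_fst_mono hS h hj hjge)⟩
      · rw [pvAdvance, dif_neg h]
        exact ⟨by omega, fun j hj hjlt => hpre j hj hjlt,
          fun j hj hjge => absurd hj (by omega)⟩
  intro p hp hpre
  exact main (S.length - p) p (le_refl _) hp hpre

-- two split points of the same threshold coincide
theorem split_unique {S : List (Int × Int)} {t : Int} {r1 r2 : Nat}
    (h1 : r1 ≤ S.length ∧ (∀ j (_hj : j < S.length), j < r1 → S[j].1 ≤ t) ∧
      (∀ j (_hj : j < S.length), r1 ≤ j → t < S[j].1))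
    (h2 : r2 ≤ S.length ∧ (∀ j (_hj : j < S.length), j < r2 → S[j].1 ≤ t) ∧
      (∀ j (_hj : j < S.length), r2 ≤ j → t < S[j].1)) : r1 = r2 := by
  by_contra hne
  rcases Nat.lt_or_ge r1 r2 with h | h
  · have hr1 : r1 < S.length := Nat.lt_of_lt_of_le h h2.1
    have := h2.2.1 r1 hr1 h
    have := h1.2.2 r1 hr1 (Nat.le_refl _)
    omega
  · have h' : r2 < r1 := Nat.lt_of_le_of_ne h (fun e => hne e.symm)
    have hr2 : r2 < S.length := Nat.lt_of_lt_of_le h' h1.1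
    have := h1.2.1 r2 hr2 h'
    have := h2.2.2 r2 hr2 (Nat.le_refl _)
    omega

-- the common per-element accumulation, written with A's bisect index
def pvG (S : List (Int × Int)) : Int → (Int × Int) → Int :=
  fun acc x =>
    max acc (x.2 -
      (PySem.List.pyGetD S ((pvBisect S (x.1 - 1000, 1000000005) 0 S.length : Nat) : Int) (0, 0)).2 + 1)

-- B's sweep over the sorted list computes the same max-fold as A's bisect loop
theorem pvLoopB (S : List (Int × Int))
    (hS : S.Pairwise (fun a b => pvLexLt b a = false))
    (hmem : ∀ x ∈ S, x.2 < 1000000005) :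
    ∀ (rest : List (Int × Int)), rest ⊆ S →
      rest.Pairwise (fun a b => pvLexLt b a = false) →
      ∀ (ans : Int) (p : Nat), p ≤ S.length →
        (∀ y ∈ rest, ∀ j (_hj : j < S.length), j < p → S[j].1 ≤ y.1 - 1000) →
        (rest.foldl (fun (st : Int × Nat) vi =>
            (max st.1 (vi.2 -
              (PySem.List.pyGetD S ((pvAdvance S (vi.1 - 1000) st.2 : Nat) : Int) (0, 0)).2 + 1),
              pvAdvance S (vi.1 - 1000) st.2)) (ans, p)).1
          = rest.foldl (pvG S) ans := by
  intro rest
  induction rest with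
  | nil => intro _ _ ans p _ _; rfl
  | cons x rest ih =>
    intro hsub hpw ans p hp hinv
    have hadv := pvAdvance_spec hS (x.1 - 1000) p hp
      (fun j hj hjp => hinv x (List.mem_cons_self) j hj hjp)
    have hbis := pvBisect_spec hS hmem (x.1 - 1000) 0 S.length (Nat.zero_le _) (le_refl _)
      (fun j _hj h => absurd h (Nat.not_lt_zero j))
      (fun j hj h => absurd hj (Nat.not_lt.2 h))
    have heq : pvAdvance S (x.1 - 1000) p = pvBisect S (x.1 - 1000, 1000000005) 0 S.length :=
      split_unique hadv hbis
    simp only [List.foldl_cons]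
    rw [heq]
    exact ih (fun y hy => hsub (List.mem_cons_of_mem _ hy)) (List.pairwise_cons.1 hpw).2
      (pvG S ans x) _ hbis.1
      (fun y hy j hj hjlt => by
        have h1 : S[j].1 ≤ x.1 - 1000 := hbis.2.1 j hj hjlt
        have h2 : x.1 ≤ y.1 := by
          have h3 := (List.pairwise_cons.1 hpw).1 y hy
          rw [pvLexLt_false_iff] at h3; omega
        omega)

-- B's zip of the truncated list with the range builds exactly A's list of pairs
theorem pvZip_eq (n : Int) (a : List Int) (hlen : n ≤ (a.length : Int)) :
    (PySem.List.slice a none (some n)).zip (PySem.List.pyRange 0 n 1)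
      = (PySem.List.pyRange 0 n 1).map (fun i => (PySem.List.pyGetD a i 0, i)) := by
  by_cases hn : 0 ≤ n
  · rw [PySem.List.slice_to a hn]
    have hcast : PySem.List.pyRange 0 n 1 = PySem.List.pyRange 0 ((n.toNat : Nat) : Int) 1 := by
      rw [Int.toNat_of_nonneg hn]
    rw [hcast, PySem.List.pyRange_zero_natCast]
    have hlen' : n.toNat ≤ a.length := by omega
    apply List.ext_getElem
    · simp; omega
    · intro i h1 h2
      have hi : i < n.toNat := by simp at h2; omega
      have hia : i < a.length := by omega
      simp only [List.getElem_zip, List.getElem_take, List.getElem_map, List.getElem_range]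
      rw [PySem.List.pyGetD_natCast, List.getD_eq_getElem a 0 hia]
  · have hR0 : PySem.List.pyRange 0 n 1 = [] := by simp [PySem.List.pyRange]; omega
    rw [hR0]; simp

-- ===== VERDICT (by name: the statement is the Claim_ definition above) =====
theorem downtime_spec : Claim_equal_downtime := by
  unfold Claim_equal_downtime
  intro n k a _hdom hpre
  unfold Spec_downtime
  obtain ⟨hlen, _hk, hinf⟩ := hpre
  simp only [downtime, downtime_alt]
  rw [PySem.List.foldl_append_singleton_eq_map (fun i => (PySem.List.pyGetD a i 0, i)) (PySem.List.pyRange 0 n 1) [],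
    List.nil_append, pvZip_eq n a hlen]
  set S := PySem.List.sorted2 ((PySem.List.pyRange 0 n 1).map (fun i => (PySem.List.pyGetD a i 0, i)))
    (fun p => p.1) (fun p => p.2) with hSdef
  have hSpw : S.Pairwise (fun a b => pvLexLt b a = false) :=
    sorted2_pairs_pairwise _
  have hperm : S.Perm ((PySem.List.pyRange 0 n 1).map (fun i => (PySem.List.pyGetD a i 0, i))) :=
    PySem.List.sorted2_perm _ _ _ _
  have hmem : ∀ x ∈ S, x.2 < 1000000005 := by
    intro x hx
    obtain ⟨i, hiR, rfl⟩ := List.mem_map.1 (hperm.mem_iff.1 hx)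
    have hi := PySem.List.mem_pyRange_one.1 hiR
    omega
  have hA : (PySem.List.pyRange 0 n 1).foldl
      (fun ans i =>
        max ans (i - (PySem.List.pyGetD S
          ((pvBisect S (PySem.List.pyGetD a i 0 - 1000, 1000000005) 0 S.length : Nat) : Int)
          (0, 0)).2 + 1)) 0
      = ((PySem.List.pyRange 0 n 1).map (fun i => (PySem.List.pyGetD a i 0, i))).foldl (pvG S) 0 := by
    rw [List.foldl_map]
    simp only [pvG]
  haveI : RightCommutative (pvG S) :=
    ⟨fun b x y => by simp only [pvG]; exact max_right_comm b _ _⟩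
  have hfold_perm : ((PySem.List.pyRange 0 n 1).map (fun i => (PySem.List.pyGetD a i 0, i))).foldl (pvG S) 0
      = S.foldl (pvG S) 0 := hperm.symm.foldl_eq 0
  have hB := pvLoopB S hSpw hmem S (fun x hx => hx) hSpw 0 0 (Nat.zero_le _)
    (fun y _hy j _hj hjlt => absurd hjlt (Nat.not_lt_zero j))
  rw [hA, hfold_perm, ← hB]
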